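-- pv_equiv track=rewrite | github.com/JuanLoncharich/Algoritmos2 | practicas/tp-grafos/code/main.py | convertToDfsTree
-- ===== SOURCE A (Python) =====
-- def convertToDfsTree(g,v):
--     if g is None:
--         return None
--     if v not in g:
--         return
--     colors = {}
--     colors[v] = 'gray'
--     dfsTree = {vertex: [] for vertex in g}
--     for vertex in g:
--         colors[vertex] = 'white'
--
--     for vertex in g[v]:
--         if colors[vertex] == 'white':
--             convertToDfsTreeR(g,vertex,colors,dfsTree)
--     return dfsTree
--
-- def convertToDfsTreeR(g,v,colors,dfsTree):
--     colors[v] = 'gray'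
--     for vertex in g[v]:
--         if colors[vertex] == 'white':
--             dfsTree[v].append(vertex)
--             convertToDfsTreeR(g,vertex,colors,dfsTree)
--     colors[v] = 'black'
-- ===== SOURCE B (Python) =====
-- def convertToDfsTree(g, v):
--     # Iterative DFS with an explicit stack of (node, remaining-neighbors) frames
--     # instead of A's recursion; return value only (no shared recursion helper).
--     if g is None:
--         return None
--     if v not in g:
--         return None
--     colors = {vertex: 'white' for vertex in g}
--     dfsTree = {vertex: [] for vertex in g}
--     for n in g[v]:
--         if colors[n] == 'white':
--             colors[n] = 'gray'
--             stack = [[n, iter(g[n])]]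
--             while stack:
--                 u, it = stack[-1]
--                 w = next(it, None)
--                 if w is None:
--                     colors[u] = 'black'
--                     stack.pop()
--                 elif colors[w] == 'white':
--                     dfsTree[u].append(w)
--                     colors[w] = 'gray'
--                     stack.append([w, iter(g[w])])
--     return dfsTree
-- ===== Notes on version B (the rewrite author's own statement) =====
-- stated objective: alternative
-- what changed: A's recursive DFS helper is replaced by an iterative DFS driven by an explicit stack of (node, remaining-neighbors) frames, preserving the root's no-edge/white behaviour that falls out of the same setup.
import Mathlib
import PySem

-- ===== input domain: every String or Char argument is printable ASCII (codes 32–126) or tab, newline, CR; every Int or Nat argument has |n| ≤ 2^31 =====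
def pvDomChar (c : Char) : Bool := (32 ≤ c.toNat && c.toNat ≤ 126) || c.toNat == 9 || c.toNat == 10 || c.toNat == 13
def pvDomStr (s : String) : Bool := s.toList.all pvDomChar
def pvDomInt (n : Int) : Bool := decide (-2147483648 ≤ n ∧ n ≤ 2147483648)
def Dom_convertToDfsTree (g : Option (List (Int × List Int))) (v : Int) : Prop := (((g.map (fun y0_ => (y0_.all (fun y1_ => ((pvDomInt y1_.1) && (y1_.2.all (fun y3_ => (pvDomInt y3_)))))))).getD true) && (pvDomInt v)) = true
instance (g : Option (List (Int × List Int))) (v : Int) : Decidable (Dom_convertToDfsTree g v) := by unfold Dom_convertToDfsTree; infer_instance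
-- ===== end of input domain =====

-- B replaces A's recursive DFS helper by an explicit-stack iterative DFS (alternative
-- decomposition, same asymptotic cost); equivalence is about the return value only.

-- ===== PORT A =====
-- helper: number of 'white' entries of a colors dict (termination measure of B's stack loop,
-- also used as the fuel bound of A's recursion); the two list lemmas below are cited by the
-- termination proofs, so they stay above the ports.
def pvWc (c : PySem.Dict Int String) : Nat :=
  ((PySem.Set.ofList c.keys).filter (fun k => c.getD k "" == "white")).length

lemma pvFilter_le {l : List Int} {p p' : Int → Bool}
    (h : ∀ x ∈ l, p' x = true → p x = true) :
    (l.filter p').length ≤ (l.filter p).length := by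
  rw [← List.countP_eq_length_filter, ← List.countP_eq_length_filter]
  exact List.countP_mono_left h

lemma pvFilter_lt {l : List Int} {w : Int} {p p' : Int → Bool}
    (hnd : l.Nodup) (hw : w ∈ l) (hpw : p w = true) (hp'w : p' w = false)
    (h : ∀ x, x ≠ w → p' x = p x) :
    (l.filter p').length < (l.filter p).length := by
  induction l with
  | nil => cases hw
  | cons a l ih =>
    rcases List.mem_cons.1 hw with rfl | hw'
    · have hnotin : w ∉ l := (List.nodup_cons.1 hnd).1
      have hle : (l.filter p').length ≤ (l.filter p).length := by
        apply pvFilter_le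
        intro x hx hpx
        have hxw : x ≠ w := fun e => hnotin (e ▸ hx)
        rw [← h x hxw]; exact hpx
      simp only [List.filter_cons, hpw, hp'w]
      simpa using Nat.lt_succ_of_le hle
    · have haw : a ≠ w := by
        intro e; exact (List.nodup_cons.1 hnd).1 (e ▸ hw')
      have hlt := ih (List.nodup_cons.1 hnd).2 hw'
      simp only [List.filter_cons, h a haw]
      rcases hpa : p a with _ | _ <;> simp only [hpa, if_pos, if_neg, Bool.false_eq_true, if_false, if_true, List.length_cons] <;> omega

lemma pvContains_of_white {c : PySem.Dict Int String} {w : Int}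
    (h : c.getD w "" = "white") : c.contains w = true := by
  rcases hc : c.contains w with _ | _
  · rw [PySem.Dict.getD_of_not_contains c "" hc] at h; simp at h
  · rfl

lemma pvWc_gray {c : PySem.Dict Int String} {w : Int}
    (h : c.getD w "" = "white") : pvWc (c.insert w "gray") < pvWc c := by
  have hcon := pvContains_of_white h
  unfold pvWc
  rw [PySem.Dict.keys_insert_of_contains c "gray" hcon]
  apply pvFilter_lt (w := w)
  · exact PySem.Set.nodup_ofList _
  · exact (PySem.Set.mem_ofList _ _).2 ((PySem.Dict.contains_iff_mem_keys c w).1 hcon)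
  · simp [h]
  · simp
  · intro x hx; simp [PySem.Dict.getD_insert, hx]

lemma pvWc_nonwhite (c : PySem.Dict Int String) (k : Int) (val : String)
    (hv : (val == "white") = false) : pvWc (c.insert k val) ≤ pvWc c := by
  have hstep : ∀ x ∈ PySem.Set.ofList c.keys,
      ((c.insert k val).getD x "" == "white") = true → (c.getD x "" == "white") = true := by
    intro x _ hx
    by_cases hxk : x = k
    · rw [hxk, PySem.Dict.getD_insert, if_pos rfl] at hx; rw [hx] at hv; simp at hv
    · rw [PySem.Dict.getD_insert, if_neg hxk] at hx; exact hx
  unfold pvWc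
  rcases hc : c.contains k with _ | _
  · rw [PySem.Dict.keys_insert_of_not_contains c val hc,
      PySem.Set.ofList_append_singleton]
    have hk : k ∉ PySem.Set.ofList c.keys := by
      intro hmem
      have := (PySem.Dict.contains_iff_mem_keys c k).2 ((PySem.Set.mem_ofList _ _).1 hmem)
      rw [hc] at this; cases this
    rw [PySem.Set.add_of_not_mem hk, List.filter_append]
    have hkf : ((c.insert k val).getD k "" == "white") = false := by
      rw [PySem.Dict.getD_insert, if_pos rfl]; exact hv
    simp only [List.filter_cons, List.filter_nil, hkf, List.length_append]
    simpa using pvFilter_le hstep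
  · rw [PySem.Dict.keys_insert_of_contains c val hc]
    exact pvFilter_le hstep

-- A's recursive DFS helper convertToDfsTreeR, transliterated with a fuel guard (the fuel,
-- gd.size at top level, is a totality guard only: A's recursion depth is bounded by the
-- number of white vertices).
mutual
def pvDfsR (gd : PySem.Dict Int (List Int)) (f : Nat) (v : Int)
    (st : PySem.Dict Int String × PySem.Dict Int (List Int)) :
    PySem.Dict Int String × PySem.Dict Int (List Int) :=
  match f with
  | 0 => st
  | Nat.succ f' =>
      let st1 := pvLoopR gd f' v (gd.getD v []) (st.1.insert v "gray", st.2)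
      (st1.1.insert v "black", st1.2)
termination_by (f, 0)

def pvLoopR (gd : PySem.Dict Int (List Int)) (f : Nat) (v : Int) (ns : List Int)
    (st : PySem.Dict Int String × PySem.Dict Int (List Int)) :
    PySem.Dict Int String × PySem.Dict Int (List Int) :=
  match ns with
  | [] => st
  | n :: ns' =>
      if st.1.getD n "" = "white"
      then pvLoopR gd f v ns' (pvDfsR gd f n (st.1, st.2.modify v [] (· ++ [n])))
      else pvLoopR gd f v ns' st
termination_by (f, ns.length + 1)
end

def convertToDfsTree (g : Option (List (Int × List Int))) (v : Int) :
    Option (List (Int × List Int)) :=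
  match g with
  | none => none
  | some gl =>
      let gd := PySem.Dict.ofList gl
      if gd.contains v then
        let colors := gd.keys.foldl (fun c k => c.insert k "white")
          ((PySem.Dict.empty : PySem.Dict Int String).insert v "gray")
        let tree := gd.keys.foldl (fun t k => t.insert k ([] : List Int))
          (PySem.Dict.empty : PySem.Dict Int (List Int))
        let fin := (gd.getD v []).foldl
          (fun st n => if st.1.getD n "" = "white" then pvDfsR gd gd.size n st else st)
          (colors, tree)
        some fin.2.items
      else none

-- ===== PORT B =====
-- the explicit-stack DFS loop of Source B: stack of (node, remaining-neighbors) frames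
def pvRunB (gd : PySem.Dict Int (List Int)) (stack : List (Int × List Int))
    (st : PySem.Dict Int String × PySem.Dict Int (List Int)) :
    PySem.Dict Int String × PySem.Dict Int (List Int) :=
  match stack with
  | [] => st
  | (u, []) :: fr => pvRunB gd fr (st.1.insert u "black", st.2)
  | (u, w :: ws) :: fr =>
      if h : st.1.getD w "" = "white"
      then pvRunB gd ((w, gd.getD w []) :: (u, ws) :: fr)
        (st.1.insert w "gray", st.2.modify u [] (· ++ [w]))
      else pvRunB gd ((u, ws) :: fr) st
termination_by (pvWc st.1, (stack.map (fun p => p.2.length + 1)).sum)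
decreasing_by
  · rcases Nat.lt_or_ge (pvWc (st.1.insert u "black")) (pvWc st.1) with hlt | hge
    · exact Prod.Lex.left _ _ hlt
    · have hle := pvWc_nonwhite st.1 u "black" (by decide)
      have : pvWc (st.1.insert u "black") = pvWc st.1 := le_antisymm hle hge
      rw [this]; exact Prod.Lex.right _ (by simp)
  · exact Prod.Lex.left _ _ (pvWc_gray h)
  · exact Prod.Lex.right _ (by simp)

def convertToDfsTree_alt (g : Option (List (Int × List Int))) (v : Int) :
    Option (List (Int × List Int)) :=
  match g with
  | none => none
  | some gl =>
      let gd := PySem.Dict.ofList gl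
      if gd.contains v then
        let colors := gd.keys.foldl (fun c k => c.insert k "white")
          (PySem.Dict.empty : PySem.Dict Int String)
        let tree := gd.keys.foldl (fun t k => t.insert k ([] : List Int))
          (PySem.Dict.empty : PySem.Dict Int (List Int))
        let fin := (gd.getD v []).foldl
          (fun st n => if st.1.getD n "" = "white"
            then pvRunB gd [(n, gd.getD n [])] (st.1.insert n "gray", st.2) else st)
          (colors, tree)
        some fin.2.items
      else none

-- ===== PRECONDITION & SPEC =====
-- pvReach gd v: the set of keys of gd reachable from v along edges between keys — the
-- standard reachable set of the input graph, computed as a monotone fixpoint (gd.size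
-- rounds suffice); a property of the input, not a replay of either port's DFS.
def pvReach (gd : PySem.Dict Int (List Int)) (v : Int) : List Int :=
  (List.range gd.size).foldl
    (fun S _ => gd.keys.filter
      (fun k => S.contains k || S.any (fun u => (gd.getD u []).contains k)))
    [v]

-- Pre_ excludes exactly the inputs on which Python A raises KeyError: v is a key of g and
-- some vertex reachable from v has a neighbor that is not a key of g (B raises there too).
def Pre_convertToDfsTree (g : Option (List (Int × List Int))) (v : Int) : Prop :=
  (match g with
   | none => true
   | some gl =>
      let gd := PySem.Dict.ofList gl
      !(gd.contains v) ||
        (pvReach gd v).all (fun u => (gd.getD u []).all (fun n => gd.contains n))) = true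
instance (g : Option (List (Int × List Int))) (v : Int) : Decidable (Pre_convertToDfsTree g v) := by unfold Pre_convertToDfsTree; infer_instance

def pvWitness_convertToDfsTree : (Option (List (Int × List Int))) × Int :=
  (some [((0 : Int), [(1 : Int)]), (1, [0])], (0 : Int))

def Spec_convertToDfsTree (g : Option (List (Int × List Int))) (v : Int) (out : Option (List (Int × List Int))) : Prop := out = convertToDfsTree_alt g v
instance (g : Option (List (Int × List Int))) (v : Int) (out : Option (List (Int × List Int))) : Decidable (Spec_convertToDfsTree g v out) := by unfold Spec_convertToDfsTree; infer_instance

-- ===== CLAIM (what is proved, stated in full; the proofs are below) =====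
def Claim_equal_convertToDfsTree : Prop := ∀ (g : Option (List (Int × List Int))) (v : Int), Dom_convertToDfsTree g v → Pre_convertToDfsTree g v → Spec_convertToDfsTree g v (convertToDfsTree g v)

-- ===== LEMMAS AND PROOFS =====

-- step (unfolding) lemmas for the three recursive functions
lemma pvRunB_nil (gd : PySem.Dict Int (List Int)) (st : PySem.Dict Int String × PySem.Dict Int (List Int)) :
    pvRunB gd [] st = st := by rw [pvRunB]

lemma pvRunB_pop (gd : PySem.Dict Int (List Int)) (u : Int) (fr : List (Int × List Int))
    (st : PySem.Dict Int String × PySem.Dict Int (List Int)) :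
    pvRunB gd ((u, []) :: fr) st = pvRunB gd fr (st.1.insert u "black", st.2) := by rw [pvRunB]

lemma pvRunB_cons (gd : PySem.Dict Int (List Int)) (u w : Int) (ws : List Int)
    (fr : List (Int × List Int)) (st : PySem.Dict Int String × PySem.Dict Int (List Int)) :
    pvRunB gd ((u, w :: ws) :: fr) st =
      if st.1.getD w "" = "white"
      then pvRunB gd ((w, gd.getD w []) :: (u, ws) :: fr)
        (st.1.insert w "gray", st.2.modify u [] (· ++ [w]))
      else pvRunB gd ((u, ws) :: fr) st := by
  rw [pvRunB]
  by_cases h : st.1.getD w "" = "white"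
  · rw [dif_pos h, if_pos h]
  · rw [dif_neg h, if_neg h]

lemma pvDfsR_zero (gd : PySem.Dict Int (List Int)) (v : Int)
    (st : PySem.Dict Int String × PySem.Dict Int (List Int)) :
    pvDfsR gd 0 v st = st := by rw [pvDfsR]

lemma pvDfsR_succ (gd : PySem.Dict Int (List Int)) (f : Nat) (v : Int)
    (st : PySem.Dict Int String × PySem.Dict Int (List Int)) :
    pvDfsR gd (f + 1) v st =
      ((pvLoopR gd f v (gd.getD v []) (st.1.insert v "gray", st.2)).1.insert v "black",
       (pvLoopR gd f v (gd.getD v []) (st.1.insert v "gray", st.2)).2) := by rw [pvDfsR]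

lemma pvLoopR_nil (gd : PySem.Dict Int (List Int)) (f : Nat) (v : Int)
    (st : PySem.Dict Int String × PySem.Dict Int (List Int)) :
    pvLoopR gd f v [] st = st := by rw [pvLoopR]

lemma pvLoopR_cons (gd : PySem.Dict Int (List Int)) (f : Nat) (v n : Int) (ns : List Int)
    (st : PySem.Dict Int String × PySem.Dict Int (List Int)) :
    pvLoopR gd f v (n :: ns) st =
      if st.1.getD n "" = "white"
      then pvLoopR gd f v ns (pvDfsR gd f n (st.1, st.2.modify v [] (· ++ [n])))
      else pvLoopR gd f v ns st := by rw [pvLoopR]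

-- A's recursion never increases the number of white vertices
lemma pvWc_loop_of_dfs (gd : PySem.Dict Int (List Int)) (f : Nat)
    (hd : ∀ v st, pvWc (pvDfsR gd f v st).1 ≤ pvWc st.1) :
    ∀ v ns st, pvWc (pvLoopR gd f v ns st).1 ≤ pvWc st.1 := by
  intro v ns
  induction ns with
  | nil => intro st; rw [pvLoopR_nil]
  | cons n ns ih =>
    intro st
    rw [pvLoopR_cons]
    by_cases h : st.1.getD n "" = "white"
    · rw [if_pos h]
      exact le_trans (ih _) (hd n (st.1, st.2.modify v [] (· ++ [n])))
    · rw [if_neg h]; exact ih st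

lemma pvWc_dfs (gd : PySem.Dict Int (List Int)) :
    ∀ (f : Nat) (v : Int) st, pvWc (pvDfsR gd f v st).1 ≤ pvWc st.1 := by
  intro f
  induction f with
  | zero => intro v st; rw [pvDfsR_zero]
  | succ f ih =>
    intro v st
    rw [pvDfsR_succ]
    refine le_trans (pvWc_nonwhite _ v "black" (by decide)) ?_
    refine le_trans (pvWc_loop_of_dfs gd f ih v _ _) ?_
    exact pvWc_nonwhite _ v "gray" (by decide)

lemma pvWc_pos {c : PySem.Dict Int String} {w : Int}
    (h : c.getD w "" = "white") : 1 ≤ pvWc c := by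
  have hcon := pvContains_of_white h
  have hw : w ∈ PySem.Set.ofList c.keys :=
    (PySem.Set.mem_ofList _ _).2 ((PySem.Dict.contains_iff_mem_keys c w).1 hcon)
  have hmem : w ∈ (PySem.Set.ofList c.keys).filter (fun k => c.getD k "" == "white") :=
    List.mem_filter.2 ⟨hw, by simp [h]⟩
  unfold pvWc
  exact List.length_pos_of_mem hmem

-- the congruence relation: equal trees, lookup-equal colors, permuted key lists
def pvRel (st₁ st₂ : PySem.Dict Int String × PySem.Dict Int (List Int)) : Prop :=
  st₁.2 = st₂.2 ∧ (∀ k, st₁.1.get? k = st₂.1.get? k) ∧ st₁.1.keys.Perm st₂.1.keys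

lemma pvRel_getD {st₁ st₂ : PySem.Dict Int String × PySem.Dict Int (List Int)}
    (h : pvRel st₁ st₂) (n : Int) : st₁.1.getD n "" = st₂.1.getD n "" := by
  rw [PySem.Dict.getD_eq_get?_getD, PySem.Dict.getD_eq_get?_getD, h.2.1 n]

lemma pvRel_insert {c₁ c₂ : PySem.Dict Int String}
    (hg : ∀ x, c₁.get? x = c₂.get? x) (hp : c₁.keys.Perm c₂.keys) (k : Int) (val : String) :
    (∀ x, (c₁.insert k val).get? x = (c₂.insert k val).get? x) ∧
      (c₁.insert k val).keys.Perm (c₂.insert k val).keys := by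
  constructor
  · intro x
    rw [PySem.Dict.get?_insert, PySem.Dict.get?_insert]
    split_ifs with hx
    · rfl
    · exact hg x
  · have hc : c₁.contains k = c₂.contains k := by
      rw [PySem.Dict.contains_eq_isSome_get?, PySem.Dict.contains_eq_isSome_get?, hg k]
    rcases h2 : c₂.contains k with _ | _
    · rw [PySem.Dict.keys_insert_of_not_contains c₁ val (hc.trans h2),
        PySem.Dict.keys_insert_of_not_contains c₂ val h2]
      exact hp.append (List.Perm.refl _)
    · rw [PySem.Dict.keys_insert_of_contains c₁ val (hc.trans h2),
        PySem.Dict.keys_insert_of_contains c₂ val h2]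
      exact hp

lemma pvCong_loop_of_dfs (gd : PySem.Dict Int (List Int)) (f : Nat)
    (hd : ∀ v st₁ st₂, pvRel st₁ st₂ → pvRel (pvDfsR gd f v st₁) (pvDfsR gd f v st₂)) :
    ∀ v ns st₁ st₂, pvRel st₁ st₂ → pvRel (pvLoopR gd f v ns st₁) (pvLoopR gd f v ns st₂) := by
  intro v ns
  induction ns with
  | nil => intro st₁ st₂ h; rw [pvLoopR_nil, pvLoopR_nil]; exact h
  | cons n ns ih =>
    intro st₁ st₂ h
    rw [pvLoopR_cons, pvLoopR_cons, pvRel_getD h n]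
    by_cases hw : st₂.1.getD n "" = "white"
    · rw [if_pos hw, if_pos hw]
      apply ih
      apply hd
      exact ⟨by simp [h.1], h.2.1, h.2.2⟩
    · rw [if_neg hw, if_neg hw]; exact ih _ _ h

lemma pvCong_dfs (gd : PySem.Dict Int (List Int)) :
    ∀ (f : Nat) (v : Int) st₁ st₂, pvRel st₁ st₂ → pvRel (pvDfsR gd f v st₁) (pvDfsR gd f v st₂) := by
  intro f
  induction f with
  | zero => intro v st₁ st₂ h; rw [pvDfsR_zero, pvDfsR_zero]; exact h
  | succ f ih =>
    intro v st₁ st₂ h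
    rw [pvDfsR_succ, pvDfsR_succ]
    have h1 : pvRel (st₁.1.insert v "gray", st₁.2) (st₂.1.insert v "gray", st₂.2) := by
      obtain ⟨hg, hpm⟩ := pvRel_insert h.2.1 h.2.2 v "gray"
      exact ⟨h.1, hg, hpm⟩
    have h2 := pvCong_loop_of_dfs gd f ih v (gd.getD v []) _ _ h1
    obtain ⟨hg, hpm⟩ := pvRel_insert h2.2.1 h2.2.2 v "black"
    exact ⟨h2.1, hg, hpm⟩

-- the key bridge: one stack frame of B's loop performs exactly one inner loop of A plus the
-- final blackening of its node
lemma pvL1 (gd : PySem.Dict Int (List Int)) (W : Nat) :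
    ∀ (v : Int) (ns : List Int) (fr : List (Int × List Int))
      (st : PySem.Dict Int String × PySem.Dict Int (List Int)) (f : Nat),
      pvWc st.1 ≤ W → pvWc st.1 ≤ f →
      pvRunB gd ((v, ns) :: fr) st =
        pvRunB gd fr ((pvLoopR gd f v ns st).1.insert v "black", (pvLoopR gd f v ns st).2) := by
  induction W using Nat.strong_induction_on with
  | _ W ihW =>
    intro v ns fr
    induction ns with
    | nil =>
      intro st f hW hf
      rw [pvLoopR_nil, pvRunB_pop]
    | cons n ns ih =>
      intro st f hW hf
      rw [pvRunB_cons, pvLoopR_cons]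
      by_cases h : st.1.getD n "" = "white"
      · rw [if_pos h, if_pos h]
        have hlt : pvWc (st.1.insert n "gray") < pvWc st.1 := pvWc_gray h
        have h1 : 1 ≤ pvWc st.1 := pvWc_pos h
        obtain ⟨f', rfl⟩ : ∃ f', f = f' + 1 := ⟨f - 1, by omega⟩
        have hstep := ihW (pvWc (st.1.insert n "gray")) (by omega) n (gd.getD n [])
          ((v, ns) :: fr) (st.1.insert n "gray", st.2.modify v [] (· ++ [n])) f' le_rfl
          (by show pvWc (st.1.insert n "gray") ≤ f'; omega)
        rw [hstep]
        have hdfs : pvDfsR gd (f' + 1) n (st.1, st.2.modify v [] (· ++ [n])) =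
            ((pvLoopR gd f' n (gd.getD n [])
                (st.1.insert n "gray", st.2.modify v [] (· ++ [n]))).1.insert n "black",
             (pvLoopR gd f' n (gd.getD n [])
                (st.1.insert n "gray", st.2.modify v [] (· ++ [n]))).2) := by
          rw [pvDfsR_succ]
        have hwc3 : pvWc ((pvLoopR gd f' n (gd.getD n [])
            (st.1.insert n "gray", st.2.modify v [] (· ++ [n]))).1.insert n "black") ≤
            pvWc (st.1.insert n "gray") :=
          le_trans (pvWc_nonwhite _ n "black" (by decide))
            (pvWc_loop_of_dfs gd f' (pvWc_dfs gd f') n _ _)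
        rw [hdfs]
        exact ih _ (f' + 1)
          (by show pvWc ((pvLoopR gd f' n (gd.getD n [])
              (st.1.insert n "gray", st.2.modify v [] (· ++ [n]))).1.insert n "black") ≤ W
              omega)
          (by show pvWc ((pvLoopR gd f' n (gd.getD n [])
              (st.1.insert n "gray", st.2.modify v [] (· ++ [n]))).1.insert n "black") ≤ f' + 1
              omega)
      · rw [if_neg h, if_neg h]
        exact ih st f hW hf

-- the top-level loops of the two ports, related step by step
lemma pvTop (gd : PySem.Dict Int (List Int)) :
    ∀ (ns : List Int) (stA stB : PySem.Dict Int String × PySem.Dict Int (List Int)),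
      pvRel stA stB → pvWc stB.1 ≤ gd.size →
      pvRel
        (ns.foldl (fun st n => if st.1.getD n "" = "white" then pvDfsR gd gd.size n st else st) stA)
        (ns.foldl (fun st n => if st.1.getD n "" = "white"
            then pvRunB gd [(n, gd.getD n [])] (st.1.insert n "gray", st.2) else st) stB) := by
  intro ns
  induction ns with
  | nil => intro stA stB h _; simpa using h
  | cons n ns ih =>
    intro stA stB h hwc
    rw [List.foldl_cons, List.foldl_cons, pvRel_getD h n]
    by_cases hw : stB.1.getD n "" = "white"
    · rw [if_pos hw, if_pos hw]
      have h1 : 1 ≤ pvWc stB.1 := pvWc_pos hw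
      obtain ⟨f', hsz⟩ : ∃ f', gd.size = f' + 1 := ⟨gd.size - 1, by omega⟩
      have hlt : pvWc (stB.1.insert n "gray") < pvWc stB.1 := pvWc_gray hw
      have hBeq : pvRunB gd [(n, gd.getD n [])] (stB.1.insert n "gray", stB.2) =
          pvDfsR gd gd.size n stB := by
        have hL := pvL1 gd (pvWc (stB.1.insert n "gray")) n (gd.getD n []) []
          (stB.1.insert n "gray", stB.2) f' le_rfl
          (by show pvWc (stB.1.insert n "gray") ≤ f'; omega)
        rw [hL, pvRunB_nil, hsz, pvDfsR_succ]
      rw [hBeq]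
      exact ih _ _ (pvCong_dfs gd gd.size n _ _ h)
        (le_trans (pvWc_dfs gd gd.size n stB) hwc)
    · rw [if_neg hw, if_neg hw]
      exact ih _ _ h hwc

-- the initial colors dicts of the two ports agree on every lookup and have permuted keys
lemma pvGetFoldWhite (ks : List Int) (d0 : PySem.Dict Int String) (x : Int) :
    (ks.foldl (fun c k => c.insert k "white") d0).get? x =
      if x ∈ ks then some "white" else d0.get? x := by
  induction ks generalizing d0 with
  | nil => simp
  | cons k ks ih =>
    rw [List.foldl_cons, ih]
    by_cases h1 : x ∈ ks
    · simp [h1]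
    · rw [PySem.Dict.get?_insert]
      by_cases h2 : x = k <;> simp [h1, h2]

lemma pvKeysPerm (l : List Int) (v : Int) (hv : v ∈ l) :
    (PySem.Set.update [v] l).Perm (PySem.Set.ofList l) := by
  rw [PySem.Set.update_eq_append_filter]
  have hv' : v ∈ PySem.Set.ofList l := (PySem.Set.mem_ofList _ _).2 hv
  have hperm := List.perm_cons_erase hv'
  have herase := (PySem.Set.nodup_ofList l).erase_eq_filter v
  refine List.Perm.trans ?_ hperm.symm
  rw [herase]
  have hfc : List.filter (fun y => !(PySem.Set.contains [v] y)) (PySem.Set.ofList l) =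
      List.filter (fun x => x != v) (PySem.Set.ofList l) := by
    apply List.filter_congr
    intro x _
    by_cases hxv : x = v <;> simp [PySem.Set.contains, bne, hxv]
  rw [hfc]
  exact List.Perm.refl _

theorem convertToDfsTree_spec : Claim_equal_convertToDfsTree := by
  unfold Claim_equal_convertToDfsTree
  intro g v _ _
  unfold Spec_convertToDfsTree
  rcases g with _ | gl
  · rfl
  · simp only [convertToDfsTree, convertToDfsTree_alt]
    by_cases hv : (PySem.Dict.ofList gl).contains v = true
    · rw [if_pos hv, if_pos hv]
      set gd := PySem.Dict.ofList gl with hgd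
      have hvk : v ∈ gd.keys := (PySem.Dict.contains_iff_mem_keys gd v).1 hv
      have hg0 : ∀ x, (gd.keys.foldl (fun c k => c.insert k "white")
          ((PySem.Dict.empty : PySem.Dict Int String).insert v "gray")).get? x =
          (gd.keys.foldl (fun c k => c.insert k "white")
            (PySem.Dict.empty : PySem.Dict Int String)).get? x := by
        intro x
        rw [pvGetFoldWhite, pvGetFoldWhite]
        by_cases hx : x ∈ gd.keys
        · rw [if_pos hx, if_pos hx]
        · have hxv : x ≠ v := fun e => hx (e ▸ hvk)
          rw [if_neg hx, if_neg hx, PySem.Dict.get?_insert, if_neg hxv]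
      have hkeysA : (gd.keys.foldl (fun c k => c.insert k "white")
          ((PySem.Dict.empty : PySem.Dict Int String).insert v "gray")).keys =
          PySem.Set.update [v] gd.keys := by
        rw [PySem.Dict.keys_foldl_insert (f := fun _ _ => "white")]
        congr 1
      have hkeysB : (gd.keys.foldl (fun c k => c.insert k "white")
          (PySem.Dict.empty : PySem.Dict Int String)).keys = PySem.Set.ofList gd.keys := by
        rw [PySem.Dict.keys_foldl_insert (f := fun _ _ => "white"), PySem.Dict.keys_empty,
          PySem.Set.update_nil_left]
      have hperm0 : (gd.keys.foldl (fun c k => c.insert k "white")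
          ((PySem.Dict.empty : PySem.Dict Int String).insert v "gray")).keys.Perm
          (gd.keys.foldl (fun c k => c.insert k "white")
            (PySem.Dict.empty : PySem.Dict Int String)).keys := by
        rw [hkeysA, hkeysB]
        exact pvKeysPerm gd.keys v hvk
      have hwc0 : pvWc (gd.keys.foldl (fun c k => c.insert k "white")
          (PySem.Dict.empty : PySem.Dict Int String)) ≤ gd.size := by
        unfold pvWc
        rw [hkeysB, PySem.Set.ofList_ofList]
        calc (List.filter _ (PySem.Set.ofList gd.keys)).length
            ≤ (PySem.Set.ofList gd.keys).length := List.length_filter_le _ _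
          _ ≤ gd.keys.length := PySem.Set.length_ofList_le _
          _ = gd.size := by simp [PySem.Dict.keys, PySem.Dict.size]
      have hmain := pvTop gd (gd.getD v [])
        (gd.keys.foldl (fun c k => c.insert k "white")
          ((PySem.Dict.empty : PySem.Dict Int String).insert v "gray"),
         gd.keys.foldl (fun t k => t.insert k ([] : List Int))
          (PySem.Dict.empty : PySem.Dict Int (List Int)))
        (gd.keys.foldl (fun c k => c.insert k "white")
          (PySem.Dict.empty : PySem.Dict Int String),
         gd.keys.foldl (fun t k => t.insert k ([] : List Int))
          (PySem.Dict.empty : PySem.Dict Int (List Int)))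
        ⟨rfl, hg0, hperm0⟩ hwc0
      rw [hmain.1]
    · rw [if_neg hv, if_neg hv]
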